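-- pv_equiv track=rewrite | github.com/FrancoLopez0/test_actions | tools/get_impacted_tests.py | get_impacted_tests
-- ===== SOURCE A (Python) =====
-- import fnmatch
--
-- def get_impacted_tests(changed_files):
--     if not changed_files:
--         return ""
--
--     impacted_tests = set()
--     full_trigger_patterns = [
--         "CMakeLists.txt",
--         "FreeRTOSConfig.h",
--         ".github/workflows/*",
--         "pico_sdk_import.cmake",
--     ]
--
--     # Mapping patterns to test regexes
--     mappings = [
--         ("src/hal/*", "SIL_Blinky"),
--         ("src/middleware/mw_led.c", "SIL_Blinky"),
--         ("test/SIL/test_blinky.c", "SIL_Blinky"),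
--     ]
--
--     skip_patterns = [
--         "README.md",
--         ".gitignore",
--         ".cppcheck_suppressions",
--     ]
--
--     run_all = False
--     has_relevant_changes = False
--
--     for f in changed_files:
--         # Check for full trigger
--         for pattern in full_trigger_patterns:
--             if fnmatch.fnmatch(f, pattern):
--                 run_all = True
--                 break
--         if run_all:
--             break
--
--         # Check for skips
--         is_skip = False
--         for pattern in skip_patterns:
--             if fnmatch.fnmatch(f, pattern):
--                 is_skip = True
--                 break
--         if is_skip:
--             continue
--
--         # If it's a source file or test file not explicitly mapped, fallback to run all
--         # unless it's explicitly mapped to something.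
--         matched = False
--         for pattern, test_regex in mappings:
--             if fnmatch.fnmatch(f, pattern):
--                 impacted_tests.add(test_regex)
--                 matched = True
--                 has_relevant_changes = True
--
--         if not matched:
--             # Fallback for unmapped source/test files
--             if f.startswith("src/") or f.startswith("test/") or f.startswith("libs/") or f.endswith(".c") or f.endswith(".h"):
--                 run_all = True
--                 break
--             # If we reach here, it might be an unknown file type or in an unknown directory.
--             # We don't set has_relevant_changes if it's not a source/test file.
--
--     if run_all:
--         return "."
--
--     if not impacted_tests and not has_relevant_changes:
--         return ""
--
--     return "|".join(sorted(list(impacted_tests)))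
-- ===== SOURCE B (Python) =====
-- def get_impacted_tests(changed_files):
--     if not changed_files:
--         return ""
--
--     def is_full_trigger(f):
--         return f in ("CMakeLists.txt", "FreeRTOSConfig.h", "pico_sdk_import.cmake") \
--             or f.startswith(".github/workflows/")
--
--     def is_skip(f):
--         return f in ("README.md", ".gitignore", ".cppcheck_suppressions")
--
--     def mapped_tests(f):
--         tests = []
--         if f.startswith("src/hal/"):
--             tests.append("SIL_Blinky")
--         if f == "src/middleware/mw_led.c":
--             tests.append("SIL_Blinky")
--         if f == "test/SIL/test_blinky.c":
--             tests.append("SIL_Blinky")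
--         return tests
--
--     def is_fallback(f):
--         return f.startswith(("src/", "test/", "libs/")) or f.endswith((".c", ".h"))
--
--     if any(is_full_trigger(f)
--            or (not is_skip(f) and not mapped_tests(f) and is_fallback(f))
--            for f in changed_files):
--         return "."
--
--     impacted = {t for f in changed_files if not is_skip(f) for t in mapped_tests(f)}
--     return "|".join(sorted(impacted))
-- ===== Notes on version B (the rewrite author's own statement) =====
-- stated objective: simpler
-- what changed: Replaces A's single stateful early-break loop with its matched/has_relevant_changes flag pair and fnmatch calls by two independent passes — an any() over a per-file trigger predicate deciding run-all, and a set comprehension collecting mapped test regexes — with the fixed glob patterns expanded into direct equality/startswith tests; '' falls out of joining the empty set.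
import Mathlib
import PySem

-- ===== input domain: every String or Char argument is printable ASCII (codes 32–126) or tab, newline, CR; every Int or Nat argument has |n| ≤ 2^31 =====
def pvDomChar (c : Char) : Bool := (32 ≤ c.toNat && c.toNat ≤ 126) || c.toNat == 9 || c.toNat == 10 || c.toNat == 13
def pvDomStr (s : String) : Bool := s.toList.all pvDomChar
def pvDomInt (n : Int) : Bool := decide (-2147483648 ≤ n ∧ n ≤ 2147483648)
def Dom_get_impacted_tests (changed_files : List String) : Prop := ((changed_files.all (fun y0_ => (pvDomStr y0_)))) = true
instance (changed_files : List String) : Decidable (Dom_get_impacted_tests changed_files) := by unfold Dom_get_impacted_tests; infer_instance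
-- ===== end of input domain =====

-- B replaces A's single stateful early-break loop and fnmatch calls by two independent passes
-- (an any() trigger predicate and a set comprehension) with the fixed glob patterns expanded
-- into direct equality/startswith tests; objective: simpler.

-- ===== PORT A =====
-- Hand-written fnmatch.fnmatch, exact for patterns built from literal characters and '*'
-- (A's patterns contain no '?', '[' and no case-folding applies on POSIX): '*' matches any
-- sequence of characters (including '/').
def pvFnm (s p : List Char) : Bool :=
  match p, s with
  | [], s => s.isEmpty
  | q :: ps, [] => if q = '*' then pvFnm [] ps else false
  | q :: ps, c :: cs =>
      if q = '*' then pvFnm (c :: cs) ps || pvFnm cs (q :: ps)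
      else c == q && pvFnm cs ps
termination_by p.length + s.length

def pvFnmatch (f pat : String) : Bool := pvFnm f.toList pat.toList

def pvFullTriggers : List String :=
  ["CMakeLists.txt", "FreeRTOSConfig.h", ".github/workflows/*", "pico_sdk_import.cmake"]

def pvMappings : List (String × String) :=
  [("src/hal/*", "SIL_Blinky"),
   ("src/middleware/mw_led.c", "SIL_Blinky"),
   ("test/SIL/test_blinky.c", "SIL_Blinky")]

def pvSkips : List String := ["README.md", ".gitignore", ".cppcheck_suppressions"]

-- the main 'for f in changed_files' loop; state = (run_all-at-break, has_relevant_changes, impacted_tests)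
def pvLoopA : List String → PySem.Set String → Bool → Bool × Bool × PySem.Set String
  | [], imp, hrc => (false, hrc, imp)
  | f :: rest, imp, hrc =>
    if pvFullTriggers.any (fun p => pvFnmatch f p) then (true, hrc, imp)
    else if pvSkips.any (fun p => pvFnmatch f p) then pvLoopA rest imp hrc
    else
      let st := pvMappings.foldl
        (fun (st : PySem.Set String × Bool × Bool) m =>
          if pvFnmatch f m.1 then (PySem.Set.add st.1 m.2, true, true) else st)
        (imp, false, hrc)
      if st.2.1 then pvLoopA rest st.1 st.2.2
      else if PySem.Str.startswith f "src/" || PySem.Str.startswith f "test/" ||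
              PySem.Str.startswith f "libs/" || PySem.Str.endswith f ".c" ||
              PySem.Str.endswith f ".h" then (true, st.2.2, st.1)
      else pvLoopA rest st.1 st.2.2

def get_impacted_tests (changed_files : List String) : String :=
  if changed_files = [] then ""
  else
    let r := pvLoopA changed_files (PySem.Set.ofList []) false
    if r.1 then "."
    else if r.2.2.isEmpty && !r.2.1 then ""
    else PySem.Str.join "|" (PySem.List.sorted r.2.2 (fun x => x) false)

-- ===== PORT B =====
def pvIsFullTrigger (f : String) : Bool :=
  (f == "CMakeLists.txt" || f == "FreeRTOSConfig.h" || f == "pico_sdk_import.cmake") ||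
  PySem.Str.startswith f ".github/workflows/"

def pvIsSkip (f : String) : Bool :=
  f == "README.md" || f == ".gitignore" || f == ".cppcheck_suppressions"

def pvMappedTests (f : String) : List String :=
  (if PySem.Str.startswith f "src/hal/" then ["SIL_Blinky"] else []) ++
  (if f == "src/middleware/mw_led.c" then ["SIL_Blinky"] else []) ++
  (if f == "test/SIL/test_blinky.c" then ["SIL_Blinky"] else [])

def pvIsFallback (f : String) : Bool :=
  PySem.Str.startswith f "src/" || PySem.Str.startswith f "test/" ||
  PySem.Str.startswith f "libs/" || PySem.Str.endswith f ".c" || PySem.Str.endswith f ".h"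

def get_impacted_tests_alt (changed_files : List String) : String :=
  if changed_files = [] then ""
  else if changed_files.any (fun f =>
        pvIsFullTrigger f || (!pvIsSkip f && (pvMappedTests f).isEmpty && pvIsFallback f))
    then "."
  else
    let impacted := PySem.Set.ofList
      (changed_files.flatMap (fun f => if pvIsSkip f then [] else pvMappedTests f))
    PySem.Str.join "|" (PySem.List.sorted impacted (fun x => x) false)

-- ===== PRECONDITION & SPEC =====
def Spec_get_impacted_tests (changed_files : List String) (out : String) : Prop := out = get_impacted_tests_alt changed_files
instance (changed_files : List String) (out : String) : Decidable (Spec_get_impacted_tests changed_files out) := by unfold Spec_get_impacted_tests; infer_instance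

-- ===== CLAIM (what is proved, stated in full; the proofs are below) =====
def Claim_equal_get_impacted_tests : Prop := ∀ (changed_files : List String), Dom_get_impacted_tests changed_files → Spec_get_impacted_tests changed_files (get_impacted_tests changed_files)

-- ===== LEMMAS AND PROOFS =====

-- fnmatch on a pattern without '*' is string equality
theorem pvFnm_lit (p : List Char) (hp : '*' ∉ p) : ∀ s, pvFnm s p = decide (s = p) := by
  induction p with
  | nil => intro s; cases s <;> simp [pvFnm]
  | cons q ps ih =>
    intro s
    have hq : q ≠ '*' := fun h => hp (h ▸ List.mem_cons_self ..)
    have hps : '*' ∉ ps := fun h => hp (List.mem_cons_of_mem _ h)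
    cases s with
    | nil => simp [pvFnm, hq]
    | cons c cs =>
      simp [pvFnm, hq, ih hps, List.cons.injEq]
      rw [Bool.eq_iff_iff]; simp

-- fnmatch on 'literal ++ *' is a prefix test
theorem pvFnm_star (q : List Char) (hq : '*' ∉ q) : ∀ s, pvFnm s (q ++ ['*']) = decide (q <+: s) := by
  induction q with
  | nil =>
    intro s
    induction s with
    | nil => simp [pvFnm]
    | cons c cs ihs => rw [List.nil_append] at ihs ⊢; rw [pvFnm.eq_def]; simp [pvFnm, ihs]
  | cons a q ih =>
    intro s
    have ha : a ≠ '*' := fun h => hq (h ▸ List.mem_cons_self ..)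
    have hq' : '*' ∉ q := fun h => hq (List.mem_cons_of_mem _ h)
    cases s with
    | nil => simp [pvFnm, ha]
    | cons c cs =>
      simp [pvFnm, ha, ih hq', List.cons_prefix_cons]
      rw [show (decide (a = c)) = (decide (c = a)) from decide_eq_decide.mpr eq_comm,
        Bool.eq_iff_iff]
      simp

theorem pvFnmatch_lit (f pat : String) (hp : '*' ∉ pat.toList) :
    pvFnmatch f pat = (f == pat) := by
  rw [pvFnmatch, pvFnm_lit _ hp]
  rw [Bool.eq_iff_iff]; simp [String.ext_iff]

theorem pvFnmatch_star (f pat pre : String) (h : pat.toList = pre.toList ++ ['*'])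
    (hq : '*' ∉ pre.toList) : pvFnmatch f pat = PySem.Str.startswith f pre := by
  rw [pvFnmatch, h, pvFnm_star _ hq, PySem.Str.startswith_eq]
  rw [Bool.eq_iff_iff]; simp [PySem.Chars.startswith_iff]

-- the per-file trigger predicate of B and the per-file collection of B
def pvTrig (f : String) : Bool :=
  pvIsFullTrigger f || (!pvIsSkip f && (pvMappedTests f).isEmpty && pvIsFallback f)

def pvCollect (cf : List String) : List String :=
  cf.flatMap (fun f => if pvIsSkip f then [] else pvMappedTests f)

-- A's inner pattern scans, rewritten through the fnmatch lemmas
theorem pvFull_any (f : String) :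
    pvFullTriggers.any (fun p => pvFnmatch f p) = pvIsFullTrigger f := by
  simp only [pvFullTriggers, List.any_cons, List.any_nil,
    pvFnmatch_lit f "CMakeLists.txt" (by decide),
    pvFnmatch_lit f "FreeRTOSConfig.h" (by decide),
    pvFnmatch_lit f "pico_sdk_import.cmake" (by decide),
    pvFnmatch_star f ".github/workflows/*" ".github/workflows/" (by decide) (by decide),
    pvIsFullTrigger]
  cases f == "CMakeLists.txt" <;> cases f == "FreeRTOSConfig.h" <;>
    cases f == "pico_sdk_import.cmake" <;> cases PySem.Str.startswith f ".github/workflows/" <;> rfl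

theorem pvSkip_any (f : String) :
    pvSkips.any (fun p => pvFnmatch f p) = pvIsSkip f := by
  simp only [pvSkips, List.any_cons, List.any_nil,
    pvFnmatch_lit f "README.md" (by decide),
    pvFnmatch_lit f ".gitignore" (by decide),
    pvFnmatch_lit f ".cppcheck_suppressions" (by decide),
    pvIsSkip, Bool.or_false]
  cases f == "README.md" <;> cases f == ".gitignore" <;> cases f == ".cppcheck_suppressions" <;> rfl

-- one step of A's loop, phrased with B's predicates
theorem pvLoopA_step (f : String) (rest : List String) (imp : PySem.Set String) (hrc : Bool) :
    pvLoopA (f :: rest) imp hrc =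
      if pvIsFullTrigger f then (true, hrc, imp)
      else if pvIsSkip f then pvLoopA rest imp hrc
      else if (pvMappedTests f).isEmpty then
        (if pvIsFallback f then (true, hrc, imp) else pvLoopA rest imp hrc)
      else pvLoopA rest ((pvMappedTests f).foldl PySem.Set.add imp) true := by
  rw [pvLoopA, pvFull_any, pvSkip_any]
  by_cases h1 : pvIsFullTrigger f
  · simp [h1]
  · by_cases h2 : pvIsSkip f
    · simp [h1, h2]
    · simp only [h1, h2, if_false, Bool.false_eq_true, pvIsFallback]
      simp only [pvMappings, List.foldl_cons, List.foldl_nil,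
        pvFnmatch_star f "src/hal/*" "src/hal/" (by decide) (by decide),
        pvFnmatch_lit f "src/middleware/mw_led.c" (by decide),
        pvFnmatch_lit f "test/SIL/test_blinky.c" (by decide),
        pvMappedTests]
      by_cases b1 : PySem.Str.startswith f "src/hal/" <;>
        by_cases b2 : f == "src/middleware/mw_led.c" <;>
        by_cases b3 : f == "test/SIL/test_blinky.c" <;>
        simp_all [List.foldl]

-- the loop's run_all flag is B's any()
theorem pvLoopA_fst (cf : List String) : ∀ (imp : PySem.Set String) (hrc : Bool),
    (pvLoopA cf imp hrc).1 = cf.any pvTrig := by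
  induction cf with
  | nil => intro imp hrc; simp [pvLoopA]
  | cons f rest ih =>
    intro imp hrc
    rw [pvLoopA_step, List.any_cons]
    by_cases h1 : pvIsFullTrigger f <;> by_cases h2 : pvIsSkip f <;>
      by_cases h3 : (pvMappedTests f).isEmpty <;> by_cases h4 : pvIsFallback f <;>
      simp [h1, h2, h3, h4, pvTrig, ih]

-- when no file triggers run-all, the loop's final state in closed form
theorem pvLoopA_eq (cf : List String) : ∀ (imp : PySem.Set String) (hrc : Bool),
    cf.any pvTrig = false →
    pvLoopA cf imp hrc =
      (false, hrc || !(pvCollect cf).isEmpty, (pvCollect cf).foldl PySem.Set.add imp) := by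
  induction cf with
  | nil => intro imp hrc _; simp [pvLoopA, pvCollect]
  | cons f rest ih =>
    intro imp hrc h
    rw [List.any_cons] at h
    have ht : pvTrig f = false := by cases hx : pvTrig f <;> simp_all
    have hr : rest.any pvTrig = false := by cases hx : rest.any pvTrig <;> simp_all
    rw [pvLoopA_step]
    have hcol : pvCollect (f :: rest) =
        (if pvIsSkip f then [] else pvMappedTests f) ++ pvCollect rest := by
      simp [pvCollect]
    by_cases h1 : pvIsFullTrigger f
    · simp [pvTrig, h1] at ht
    · by_cases h2 : pvIsSkip f
      · simp [h1, h2, ih _ _ hr, hcol]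
      · by_cases h3 : (pvMappedTests f).isEmpty
        · have h4 : pvIsFallback f = false := by
            simp [pvTrig, h1, h2, h3] at ht; exact ht
          simp [h1, h2, h4, ih _ _ hr, hcol, List.isEmpty_iff.1 h3]
        · simp only [h1, h2, h3, ih _ _ hr, hcol]
          rw [List.foldl_append]
          have hne : (pvMappedTests f).isEmpty = false := by
            cases hx : (pvMappedTests f).isEmpty <;> simp_all
          simp
          exact Or.inr fun hx => absurd (by simp [hx]) h3

-- ===== VERDICT (by name: the statement is the Claim_ definition above) =====
theorem get_impacted_tests_spec : Claim_equal_get_impacted_tests := by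
  intro cf _
  unfold Spec_get_impacted_tests get_impacted_tests get_impacted_tests_alt
  by_cases hnil : cf = []
  · simp [hnil]
  · simp only [hnil, if_false]
    by_cases ht : cf.any pvTrig
    · have := pvLoopA_fst cf (PySem.Set.ofList []) false
      rw [ht] at this
      simp only [this, if_true]
      have ht2 : cf.any (fun f =>
          pvIsFullTrigger f || (!pvIsSkip f && (pvMappedTests f).isEmpty && pvIsFallback f)) = true := ht
      simp [ht2]
    · have ht' : cf.any pvTrig = false := by simpa using ht
      have hB : cf.any (fun f =>
          pvIsFullTrigger f || (!pvIsSkip f && (pvMappedTests f).isEmpty && pvIsFallback f)) = false := ht'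
      rw [pvLoopA_eq cf (PySem.Set.ofList []) false ht']
      simp only [hB, Bool.false_eq_true, if_false]
      have hfold : List.foldl PySem.Set.add (PySem.Set.ofList []) (pvCollect cf) =
          PySem.Set.ofList (pvCollect cf) := (PySem.Set.ofList_eq_foldl _).symm
      rw [show List.flatMap (fun f => if pvIsSkip f = true then [] else pvMappedTests f) cf
            = pvCollect cf from rfl]
      cases hc : pvCollect cf with
      | nil => rw [hc] at hfold; rw [hfold]; rfl
      | cons x xs => rw [hc] at hfold; rw [hfold]; simp
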